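-- pv_equiv track=rewrite | github.com/FnsAja/Skripsi | Aplikasi Skripsi/Function/predict.py | generateDataWordCloud
-- ===== SOURCE A (Python) =====
-- def generateDataWordCloud(processed_features, predict_result):
--     positiveWords = ''
--     netralWords = ''
--     negativeWords = ''
--     countNetral = 0
--     countPositive = 0
--     countNegative = 0
--
--     for index, content in enumerate(predict_result):
--         if content == 0:
--             countNetral += 1
--             netralWord = processed_features[index]
--             netralWords += ' ' + netralWord
--         elif content == 1:
--             countPositive += 1
--             positiveWord = processed_features[index]
--             positiveWords += ' ' + positiveWord
--         elif content == -1: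
--             countNegative += 1
--             negativeWord = processed_features[index]
--             negativeWords += ' ' + negativeWord
--
--     return positiveWords, netralWords, negativeWords, countPositive, countNetral, countNegative
-- ===== SOURCE B (Python) =====
-- def generateDataWordCloud(processed_features, predict_result):
--     def pick(label):
--         return [processed_features[i] for i, c in enumerate(predict_result) if c == label]
--     positive = pick(1)
--     netral = pick(0)
--     negative = pick(-1)
--     return (''.join(' ' + w for w in positive),
--             ''.join(' ' + w for w in netral),
--             ''.join(' ' + w for w in negative),
--             len(positive), len(netral), len(negative))
-- ===== Notes on version B (the rewrite author's own statement) =====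
-- stated objective: alternative
-- what changed: Replaces the single branching loop maintaining six accumulators with three independent per-label comprehension passes, deriving each words string by join and each count by len of the collected list.
import Mathlib
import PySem

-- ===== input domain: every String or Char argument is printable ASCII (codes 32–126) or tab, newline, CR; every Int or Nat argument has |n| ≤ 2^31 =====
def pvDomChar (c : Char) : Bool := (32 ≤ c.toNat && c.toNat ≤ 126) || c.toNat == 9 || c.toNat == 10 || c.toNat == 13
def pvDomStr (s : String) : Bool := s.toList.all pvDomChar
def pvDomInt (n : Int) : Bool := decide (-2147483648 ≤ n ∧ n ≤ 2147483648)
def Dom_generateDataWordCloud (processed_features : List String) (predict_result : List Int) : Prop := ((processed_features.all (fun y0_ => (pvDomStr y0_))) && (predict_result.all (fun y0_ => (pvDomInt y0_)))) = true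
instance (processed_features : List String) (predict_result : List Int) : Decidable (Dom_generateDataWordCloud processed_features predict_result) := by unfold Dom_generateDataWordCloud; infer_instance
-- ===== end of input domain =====

-- B replaces A's single branching loop (six accumulators) with three independent
-- per-label passes: collect the matching words, then join and count them (objective: alternative).
-- Pre_ excludes inputs where Python A raises IndexError (a counted label at an index
-- beyond processed_features); both ports totalize that lookup with a default.

-- ===== PORT A =====
-- A's loop: fold over enumerate(predict_result) with the six accumulators as state.
def pvStepA (processed_features : List String)
    (s : String × String × String × Int × Int × Int) (p : Int × Int) :
    String × String × String × Int × Int × Int :=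
  let (positiveWords, netralWords, negativeWords, countPositive, countNetral, countNegative) := s
  if p.2 = 0 then
    (positiveWords, netralWords ++ (" " ++ PySem.List.pyGetD processed_features p.1 ""),
     negativeWords, countPositive, countNetral + 1, countNegative)
  else if p.2 = 1 then
    (positiveWords ++ (" " ++ PySem.List.pyGetD processed_features p.1 ""),
     netralWords, negativeWords, countPositive + 1, countNetral, countNegative)
  else if p.2 = -1 then
    (positiveWords, netralWords,
     negativeWords ++ (" " ++ PySem.List.pyGetD processed_features p.1 ""),
     countPositive, countNetral, countNegative + 1)
  else s

def generateDataWordCloud (processed_features : List String) (predict_result : List Int) :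
    String × String × String × Int × Int × Int :=
  (PySem.List.enumerate predict_result).foldl (pvStepA processed_features) ("", "", "", 0, 0, 0)

-- ===== PORT B =====
-- B's pick(label): one comprehension pass per label.
def pvPick (processed_features : List String) (predict_result : List Int) (label : Int) :
    List String :=
  (PySem.List.enumerate predict_result).filterMap
    (fun p => if p.2 = label then some (PySem.List.pyGetD processed_features p.1 "") else none)

-- ''.join(' ' + w for w in ws)
def pvJoin (ws : List String) : String := String.join (ws.map (fun w => " " ++ w))

def generateDataWordCloud_alt (processed_features : List String) (predict_result : List Int) :
    String × String × String × Int × Int × Int :=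
  let positive := pvPick processed_features predict_result 1
  let netral := pvPick processed_features predict_result 0
  let negative := pvPick processed_features predict_result (-1)
  (pvJoin positive, pvJoin netral, pvJoin negative,
   (positive.length : Int), (netral.length : Int), (negative.length : Int))

-- ===== PRECONDITION & SPEC =====
-- Pre_ excludes exactly the inputs on which Python A raises IndexError: a label in
-- {0, 1, -1} occurring at an index with no corresponding entry in processed_features.
def Pre_generateDataWordCloud (processed_features : List String) (predict_result : List Int) : Prop :=
  ∀ i : Nat, (h : i < predict_result.length) →
    (predict_result[i] = 0 ∨ predict_result[i] = 1 ∨ predict_result[i] = -1) →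
    i < processed_features.length
instance (processed_features : List String) (predict_result : List Int) :
    Decidable (Pre_generateDataWordCloud processed_features predict_result) := by
  unfold Pre_generateDataWordCloud; infer_instance
def pvWitness_generateDataWordCloud : List String × List Int := (["good", "bad", "meh"], [1, -1, 0])

def Spec_generateDataWordCloud (processed_features : List String) (predict_result : List Int) (out : String × String × String × Int × Int × Int) : Prop := out = generateDataWordCloud_alt processed_features predict_result
instance (processed_features : List String) (predict_result : List Int) (out : String × String × String × Int × Int × Int) : Decidable (Spec_generateDataWordCloud processed_features predict_result out) := by unfold Spec_generateDataWordCloud; infer_instance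

-- ===== CLAIM (what is proved, stated in full; the proofs are below) =====
def Claim_equal_generateDataWordCloud : Prop := ∀ (processed_features : List String) (predict_result : List Int), Dom_generateDataWordCloud processed_features predict_result → Pre_generateDataWordCloud processed_features predict_result → Spec_generateDataWordCloud processed_features predict_result (generateDataWordCloud processed_features predict_result)

-- ===== LEMMAS AND PROOFS =====

theorem pvFoldl_append_eq (a : String) (L : List String) :
    List.foldl (fun r s => r ++ s) a L = a ++ List.foldl (fun r s => r ++ s) "" L := by
  induction L generalizing a with
  | nil => simp
  | cons x xs ih =>
    simp only [List.foldl_cons]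
    rw [ih (a ++ x), ih ("" ++ x)]
    simp [String.append_assoc]

theorem pvJoin_nil : pvJoin [] = "" := rfl

theorem pvJoin_cons (w : String) (ws : List String) :
    pvJoin (w :: ws) = (" " ++ w) ++ pvJoin ws := by
  simp only [pvJoin, List.map_cons, String.join]
  simp only [List.foldl_cons]
  rw [pvFoldl_append_eq]
  simp

-- One A-loop step from any state, described by B's three lists: closed form of the fold.
theorem foldA_closed (pf : List String) (l : List (Int × Int))
    (s : String × String × String × Int × Int × Int) :
    l.foldl (pvStepA pf) s =
      (s.1 ++ pvJoin (l.filterMap (fun p => if p.2 = 1 then some (PySem.List.pyGetD pf p.1 "") else none)),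
       s.2.1 ++ pvJoin (l.filterMap (fun p => if p.2 = 0 then some (PySem.List.pyGetD pf p.1 "") else none)),
       s.2.2.1 ++ pvJoin (l.filterMap (fun p => if p.2 = -1 then some (PySem.List.pyGetD pf p.1 "") else none)),
       s.2.2.2.1 + ((l.filterMap (fun p => if p.2 = 1 then some (PySem.List.pyGetD pf p.1 "") else none)).length : Int),
       s.2.2.2.2.1 + ((l.filterMap (fun p => if p.2 = 0 then some (PySem.List.pyGetD pf p.1 "") else none)).length : Int),
       s.2.2.2.2.2 + ((l.filterMap (fun p => if p.2 = -1 then some (PySem.List.pyGetD pf p.1 "") else none)).length : Int)) := by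
  induction l generalizing s with
  | nil =>
    obtain ⟨s1, s2, s3, s4, s5, s6⟩ := s
    simp [pvJoin_nil]
  | cons hd tl ih =>
    obtain ⟨s1, s2, s3, s4, s5, s6⟩ := s
    by_cases h0 : hd.2 = 0
    · simp [pvStepA, h0, ih, pvJoin_cons, String.append_assoc, Prod.ext_iff]
      omega
    · by_cases h1 : hd.2 = 1
      · simp [pvStepA, h1, ih, pvJoin_cons, String.append_assoc, Prod.ext_iff]
        omega
      · by_cases h2 : hd.2 = -1
        · simp [pvStepA, h2, ih, pvJoin_cons, String.append_assoc, Prod.ext_iff]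
          omega
        · simp [pvStepA, h0, h1, h2, ih]

-- ===== VERDICT (by name: the statement is the Claim_ definition above) =====
theorem generateDataWordCloud_spec : Claim_equal_generateDataWordCloud := by
  intro pf pr _ _
  unfold Spec_generateDataWordCloud generateDataWordCloud generateDataWordCloud_alt pvPick
  rw [foldA_closed]
  simp
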